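-- pv_equiv track=rewrite | github.com/supermanimmy/advent-of-code | day_5.py | get_points_diag
-- ===== SOURCE A (Python) =====
-- def get_points_diag(p1, p2):
--     points = set()
--     x1, x2 = p1[0], p2[0]
--     y1, y2 = p1[1], p2[1]
--
--     x, y = x1, y1
--     while (not x == x2) or (not y == y2):
--         points.add((x, y))
--         if x < x2:
--             x += 1
--         elif x > x2:
--             x -= 1
--
--         if y < y2:
--             y += 1
--         elif y > y2:
--             y -= 1
--     points.add((x2, y2))
--     return list(points)
-- ===== SOURCE B (Python) =====
-- def get_points_diag(p1, p2):
--     x1, y1 = p1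
--     x2, y2 = p2
--     dx, dy = abs(x2 - x1), abs(y2 - y1)
--     sx = (x2 > x1) - (x2 < x1)
--     sy = (y2 > y1) - (y2 < y1)
--     n = max(dx, dy)
--     points = {(x1 + sx * min(i, dx), y1 + sy * min(i, dy)) for i in range(n + 1)}
--     return list(points)
-- ===== Notes on version B (the rewrite author's own statement) =====
-- stated objective: simpler
-- what changed: Replaces the conditional stepping while-loop over a growing set with a direct closed-form list comprehension: each point is computed from its index i as (x1 + sx*min(i,dx), y1 + sy*min(i,dy)), so no loop state and no set deduplication are needed (the walk's points are pairwise distinct).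
import Mathlib
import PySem

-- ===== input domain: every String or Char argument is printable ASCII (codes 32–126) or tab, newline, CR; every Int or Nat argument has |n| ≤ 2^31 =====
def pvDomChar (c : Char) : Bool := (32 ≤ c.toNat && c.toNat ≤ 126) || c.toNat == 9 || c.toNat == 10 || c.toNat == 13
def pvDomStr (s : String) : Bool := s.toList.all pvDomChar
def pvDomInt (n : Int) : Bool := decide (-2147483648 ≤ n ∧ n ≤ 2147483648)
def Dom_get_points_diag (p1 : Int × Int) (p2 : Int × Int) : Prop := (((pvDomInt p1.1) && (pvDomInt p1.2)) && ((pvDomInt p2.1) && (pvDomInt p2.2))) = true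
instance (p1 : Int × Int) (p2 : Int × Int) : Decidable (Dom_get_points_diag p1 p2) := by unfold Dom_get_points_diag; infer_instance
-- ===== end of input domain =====

-- B replaces A's conditional-stepping while-loop over a growing set by a closed-form
-- list comprehension indexed by step number (objective: simpler).


-- ===== PORT A =====
-- the while-loop: add (x,y), step x toward x2, step y toward y2; on exit add (x2,y2).
-- fuel = max(|x2-x|, |y2-y|) is exactly the number of iterations Python's loop performs,
-- so the fuel-0 arm is only reached with x = x2 and y = y2 (the loop-exit line).
def get_points_diag_loop (x2 y2 : Int) : Nat → Int → Int → PySem.Set (Int × Int) → PySem.Set (Int × Int)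
  | fuel + 1, x, y, points =>
    if ¬x = x2 ∨ ¬y = y2 then
      get_points_diag_loop x2 y2 fuel
        (if x < x2 then x + 1 else if x > x2 then x - 1 else x)
        (if y < y2 then y + 1 else if y > y2 then y - 1 else y)
        (PySem.Set.add points (x, y))
    else PySem.Set.add points (x2, y2)
  | 0, _, _, points => PySem.Set.add points (x2, y2)

def get_points_diag (p1 : Int × Int) (p2 : Int × Int) : List (Int × Int) :=
  get_points_diag_loop p2.1 p2.2 (max (p2.1 - p1.1).natAbs (p2.2 - p1.2).natAbs) p1.1 p1.2 PySem.Set.empty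

-- ===== PORT B =====
def get_points_diag_alt (p1 : Int × Int) (p2 : Int × Int) : List (Int × Int) :=
  let x1 := p1.1; let y1 := p1.2
  let x2 := p2.1; let y2 := p2.2
  let dx : Int := (x2 - x1).natAbs
  let dy : Int := (y2 - y1).natAbs
  let sx : Int := (if x2 > x1 then 1 else 0) - (if x2 < x1 then 1 else 0)
  let sy : Int := (if y2 > y1 then 1 else 0) - (if y2 < y1 then 1 else 0)
  let n := max dx dy
  let points : PySem.Set (Int × Int) := PySem.Set.ofList
    ((PySem.List.pyRange 0 (n + 1) 1).map
      (fun i => (x1 + sx * min i dx, y1 + sy * min i dy)))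
  points

-- ===== PRECONDITION & SPEC =====
def Spec_get_points_diag (p1 : Int × Int) (p2 : Int × Int) (out : List (Int × Int)) : Prop := out = get_points_diag_alt p1 p2
instance (p1 : Int × Int) (p2 : Int × Int) (out : List (Int × Int)) : Decidable (Spec_get_points_diag p1 p2 out) := by unfold Spec_get_points_diag; infer_instance

-- ===== CLAIM (what is proved, stated in full; the proofs are below) =====
def Claim_equal_get_points_diag : Prop := ∀ (p1 : Int × Int) (p2 : Int × Int), Dom_get_points_diag p1 p2 → Spec_get_points_diag p1 p2 (get_points_diag p1 p2)

-- ===== LEMMAS AND PROOFS =====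

-- the point reached after i steps of A's walk from (x,y), in B's closed form
def pvPt (x2 y2 x y i : Int) : Int × Int :=
  (x + ((if x2 > x then 1 else 0) - (if x2 < x then 1 else 0)) * min i ((x2 - x).natAbs : Int),
   y + ((if y2 > y then 1 else 0) - (if y2 < y then 1 else 0)) * min i ((y2 - y).natAbs : Int))

theorem pvPt_zero (x2 y2 x y : Int) : pvPt x2 y2 x y 0 = (x, y) := by
  simp only [pvPt, Prod.mk.injEq]
  constructor <;> (split_ifs <;> omega)

theorem pvPt_step (x2 y2 x y i : Int) (hi : 0 ≤ i) :
    pvPt x2 y2 x y (i + 1) =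
      pvPt x2 y2 (if x < x2 then x + 1 else if x > x2 then x - 1 else x)
        (if y < y2 then y + 1 else if y > y2 then y - 1 else y) i := by
  simp only [pvPt, Prod.mk.injEq]
  constructor <;> (split_ifs <;> omega)

theorem pvPt_ne (x2 y2 x y i : Int) (h1 : 1 ≤ i)
    (h2 : i ≤ max ((x2 - x).natAbs : Int) ((y2 - y).natAbs : Int)) :
    pvPt x2 y2 x y i ≠ (x, y) := by
  intro heq
  simp only [pvPt, Prod.mk.injEq] at heq
  obtain ⟨e1, e2⟩ := heq
  split_ifs at e1 e2 <;> omega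

theorem loop_spec (x2 y2 : Int) : ∀ (k : Nat) (x y : Int) (s : List (Int × Int)),
    max (x2 - x).natAbs (y2 - y).natAbs = k →
    (∀ i : Int, 0 ≤ i → i ≤ (k : Int) → pvPt x2 y2 x y i ∉ s) →
    get_points_diag_loop x2 y2 k x y s =
      s ++ (PySem.List.pyRange 0 ((k : Int) + 1) 1).map (pvPt x2 y2 x y) := by
  intro k
  induction k with
  | zero =>
    intro x y s hk hs
    have hx : x = x2 ∧ y = y2 := by constructor <;> omega
    show PySem.Set.add s (x2, y2) = _
    have hmem : (x2, y2) ∉ s := by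
      have := hs 0 le_rfl (by norm_num)
      rwa [pvPt_zero, hx.1, hx.2] at this
    have hadd : PySem.Set.add s (x2, y2) = s ++ [(x2, y2)] := by
      simp [PySem.Set.add, hmem]
    rw [hadd]
    congr 1
    rw [show ((0 : Nat) : Int) + 1 = 0 + 1 by norm_num, PySem.List.pyRange_one_singleton,
      List.map_singleton, pvPt_zero, hx.1, hx.2]
  | succ k ih =>
    intro x y s hk hs
    have hcond : ¬(x = x2 ∧ y = y2) := by
      intro hxy; rw [hxy.1, hxy.2] at hk; simp at hk
    have hmem : (x, y) ∉ s := by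
      have := hs 0 le_rfl (by positivity)
      rwa [pvPt_zero] at this
    show (if ¬x = x2 ∨ ¬y = y2 then _ else PySem.Set.add s (x2, y2)) = _
    rw [if_pos (by tauto)]
    have hadd : PySem.Set.add s (x, y) = s ++ [(x, y)] := by
      simp [PySem.Set.add, hmem]
    rw [hadd]
    have hmeas : max (x2 - (if x < x2 then x + 1 else if x > x2 then x - 1 else x)).natAbs
        (y2 - (if y < y2 then y + 1 else if y > y2 then y - 1 else y)).natAbs = k := by
      split_ifs <;> omega
    have hs' : ∀ i : Int, 0 ≤ i → i ≤ (k : Int) →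
        pvPt x2 y2 (if x < x2 then x + 1 else if x > x2 then x - 1 else x)
          (if y < y2 then y + 1 else if y > y2 then y - 1 else y) i ∉ s ++ [(x, y)] := by
      intro i hi hik
      rw [← pvPt_step x2 y2 x y i hi]
      simp only [List.mem_append, List.mem_singleton]
      refine not_or.mpr ?_
      refine ⟨hs (i + 1) (by omega) (by omega), ?_⟩
      exact pvPt_ne x2 y2 x y (i + 1) (by omega) (by omega)
    rw [ih _ _ _ hmeas hs', List.append_assoc]
    congr 1
    rw [List.singleton_append]
    rw [PySem.List.pyRange_one, PySem.List.pyRange_one,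
      show ((k : Int) + 1 - 0).toNat = k + 1 by omega,
      show (((k + 1 : Nat) : Int) + 1 - 0).toNat = k + 1 + 1 by omega,
      ]
    conv_rhs => rw [List.range_succ_eq_map]
    simp only [List.map_cons, List.map_map]
    congr 1
    · norm_num [pvPt_zero]
    · apply List.map_congr_left
      intro j hj
      simp only [Function.comp, zero_add, Nat.succ_eq_add_one, Nat.cast_add, Nat.cast_one]
      exact (pvPt_step x2 y2 x y (j : Int) (by positivity)).symm

theorem loop_nodup (x2 y2 : Int) : ∀ (k : Nat) (x y : Int) (s : List (Int × Int)),
    s.Nodup → (get_points_diag_loop x2 y2 k x y s).Nodup := by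
  intro k
  induction k with
  | zero => intro x y s hs; exact PySem.Set.nodup_add _ _ hs
  | succ k ih =>
    intro x y s hs
    show (if ¬x = x2 ∨ ¬y = y2 then _ else PySem.Set.add s (x2, y2)).Nodup
    split
    · exact ih _ _ _ (PySem.Set.nodup_add _ _ hs)
    · exact PySem.Set.nodup_add _ _ hs

-- ===== VERDICT (by name: the statement is the Claim_ definition above) =====
theorem get_points_diag_spec : Claim_equal_get_points_diag := by
  intro p1 p2 _
  unfold Spec_get_points_diag get_points_diag get_points_diag_alt
  obtain ⟨x1, y1⟩ := p1
  obtain ⟨x2, y2⟩ := p2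
  dsimp only
  have hA := loop_spec x2 y2 (max (x2 - x1).natAbs (y2 - y1).natAbs) x1 y1 PySem.Set.empty rfl
    (by intro i _ _ h; simp [PySem.Set.empty] at h)
  simp only [PySem.Set.empty, List.nil_append] at hA
  have hnd := loop_nodup x2 y2 (max (x2 - x1).natAbs (y2 - y1).natAbs) x1 y1 PySem.Set.empty
    (by simp [PySem.Set.empty])
  simp only [PySem.Set.empty] at hnd ⊢
  rw [hA] at hnd
  rw [Nat.cast_max] at hA hnd
  rw [hA]
  exact (PySem.Set.ofList_eq_self_of_nodup _ hnd).symm
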